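-- pv_equiv track=rewrite | github.com/MustafaRiaz/IR-Assignments | Assignment 3/bim.py | binary_independence_model
-- ===== SOURCE A (Python) =====
-- import string
--
-- STOPWORDS = {"and", "or", "the", "is", "in", "of", "to", "for", "a", "an", "on", "by", "at", "from", "with"}
--
-- def preprocess(text):
--     tokens = text.lower().split()
--     tokens = [token.strip(string.punctuation) for token in tokens]
--     return [token for token in tokens if token and token not in STOPWORDS]
--
-- def binary_independence_model(query, documents):
--     query_terms = set(preprocess(query))
--     term_matrix = {term: [0] * len(documents) for term in query_terms}
--
--     for doc_id, tokens in documents.items():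
--         for term in query_terms:
--             if term in tokens:
--                 term_matrix[term][doc_id - 1] = 1
--
--     query_vector = [1 if term in query_terms else 0 for term in term_matrix]
--     scores = []
--
--     for doc_id in range(len(documents)):
--         doc_vector = [term_matrix[term][doc_id] for term in term_matrix]
--         intersection = sum(q * d for q, d in zip(query_vector, doc_vector))
--
--         # Apply binary scoring, 1 if intersection > 0 else 0
--         if intersection > 0:
--             scores.append((doc_id + 1, 1))  # Relevant document
--         else:
--             scores.append((doc_id + 1, 0))  # Irrelevant document
--
--     return scores
-- ===== SOURCE B (Python) =====
-- import string
--
-- STOPWORDS = {"and", "or", "the", "is", "in", "of", "to", "for", "a", "an", "on", "by", "at", "from", "with"}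
--
-- def preprocess(text):
--     tokens = text.lower().split()
--     tokens = [token.strip(string.punctuation) for token in tokens]
--     return [token for token in tokens if token and token not in STOPWORDS]
--
-- def binary_independence_model(query, documents):
--     query_terms = set(preprocess(query))
--     scores = [0] * len(documents)
--     for doc_id, tokens in documents.items():
--         if any(term in tokens for term in query_terms):
--             scores[doc_id - 1] = 1
--     return [(i, s) for i, s in enumerate(scores, start=1)]
-- ===== Notes on version B (the rewrite author's own statement) =====
-- stated objective: simpler
-- what changed: B drops A's per-term incidence matrix, query vector and dot-product pass: one pass over the documents marks a single shared score row (scores[doc_id - 1] = 1 when any preprocessed query term is among the tokens) and the row is enumerated into the result.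
import Mathlib
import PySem

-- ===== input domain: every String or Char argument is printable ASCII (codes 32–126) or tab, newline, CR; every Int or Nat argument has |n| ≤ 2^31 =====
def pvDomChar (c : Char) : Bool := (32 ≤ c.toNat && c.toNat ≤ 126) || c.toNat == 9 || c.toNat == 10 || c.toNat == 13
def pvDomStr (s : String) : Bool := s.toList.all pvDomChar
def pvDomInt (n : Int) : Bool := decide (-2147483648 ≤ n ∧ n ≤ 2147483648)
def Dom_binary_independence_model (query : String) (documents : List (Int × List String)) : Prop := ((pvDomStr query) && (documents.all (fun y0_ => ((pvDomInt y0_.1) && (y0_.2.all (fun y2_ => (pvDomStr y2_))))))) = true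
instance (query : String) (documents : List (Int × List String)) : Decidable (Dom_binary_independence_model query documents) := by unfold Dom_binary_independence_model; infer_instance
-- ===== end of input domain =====

-- B drops A's term-document matrix / query-vector / dot-product machinery and scores each document by a single
-- direct membership scan; same result, simpler structure (no speed claim).

-- ===== PORT A =====
def pvStopwords : List String :=
  ["and", "or", "the", "is", "in", "of", "to", "for", "a", "an", "on", "by", "at", "from", "with"]

def pvPreprocess (text : String) : List String :=
  ((PySem.Str.split₀ (PySem.Str.lower text)).map
      (fun token => PySem.Str.stripChars token "!\"#$%&'()*+,-./:;<=>?@[\\]^_`{|}~")).filter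
    (fun token => !(token == "") && !(pvStopwords.contains token))

def binary_independence_model (query : String) (documents : List (Int × List String)) : List (Int × Int) :=
  let query_terms : PySem.Set String := PySem.Set.ofList (pvPreprocess query)
  let term_matrix : PySem.Dict String (List Int) :=
    query_terms.foldl (fun d term => d.insert term (List.replicate documents.length 0)) PySem.Dict.empty
  let term_matrix :=
    documents.foldl (fun d p =>
      query_terms.foldl (fun d term =>
        if term ∈ p.2 then d.modify term [] (fun row => PySem.List.pySetD row (p.1 - 1) 1) else d) d)
      term_matrix
  let query_vector : List Int :=
    term_matrix.keys.map (fun term => if query_terms.contains term then 1 else 0)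
  (PySem.List.pyRange 0 (documents.length : Int) 1).foldl (fun scores doc_id =>
    let doc_vector :=
      term_matrix.keys.map (fun term => PySem.List.pyGetD (term_matrix.getD term []) doc_id 0)
    let intersection := ((query_vector.zip doc_vector).map (fun qd => qd.1 * qd.2)).sum
    if intersection > 0 then scores ++ [(doc_id + 1, 1)] else scores ++ [(doc_id + 1, 0)]) []

-- ===== PORT B =====
def binary_independence_model_alt (query : String) (documents : List (Int × List String)) : List (Int × Int) :=
  let query_terms : PySem.Set String := PySem.Set.ofList (pvPreprocess query)
  let scores :=
    documents.foldl (fun scores p =>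
        if query_terms.any (fun term => p.2.contains term)
        then PySem.List.pySetD scores (p.1 - 1) 1 else scores)
      (List.replicate documents.length (0 : Int))
  PySem.List.enumerate scores 1

-- ===== PRECONDITION & SPEC =====
-- Pre_ states exactly where Python A returns, as a membership/bounds condition on the input: every document that
-- contains a preprocessed query term has its id inside [1-len(documents), len(documents)] (the window where list
-- indexing by id-1 is defined); a matched document with an id outside that window raises IndexError in A and B alike.
def Pre_binary_independence_model (query : String) (documents : List (Int × List String)) : Prop :=
  ∀ p ∈ documents, (∃ t ∈ pvPreprocess query, t ∈ p.2) →
    1 - (documents.length : Int) ≤ p.1 ∧ p.1 ≤ (documents.length : Int)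
instance (query : String) (documents : List (Int × List String)) : Decidable (Pre_binary_independence_model query documents) := by unfold Pre_binary_independence_model; infer_instance

def pvWitness_binary_independence_model : String × (List (Int × List String)) :=
  ("apple cat", [(1, ["apple", "pie"]), (2, ["dog"])])

def Spec_binary_independence_model (query : String) (documents : List (Int × List String)) (out : List (Int × Int)) : Prop := out = binary_independence_model_alt query documents
instance (query : String) (documents : List (Int × List String)) (out : List (Int × Int)) : Decidable (Spec_binary_independence_model query documents out) := by unfold Spec_binary_independence_model; infer_instance

-- ===== CLAIM (what is proved, stated in full; the proofs are below) =====
def Claim_equal_binary_independence_model : Prop := ∀ (query : String) (documents : List (Int × List String)), Dom_binary_independence_model query documents → Pre_binary_independence_model query documents → Spec_binary_independence_model query documents (binary_independence_model query documents)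

-- ===== LEMMAS AND PROOFS =====

-- getD after seeding every term of ts with the same fresh row v
theorem pv_getD_seed (ts : List String) (v : List Int) (d : PySem.Dict String (List Int)) (t : String) :
    (ts.foldl (fun d term => d.insert term v) d).getD t [] = if t ∈ ts then v else d.getD t [] := by
  induction ts generalizing d with
  | nil => simp
  | cons a ts ih =>
      simp only [List.foldl_cons, ih, PySem.Dict.getD_insert, List.mem_cons]
      by_cases h1 : t ∈ ts <;> by_cases h2 : t = a <;> simp [h1, h2]

-- the inner per-document loop, read back at one term (ts has no duplicates)
theorem pv_inner_getD (ts : List String) (hts : ts.Nodup) (tok : List String)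
    (f : List Int → List Int) (d : PySem.Dict String (List Int)) (t : String) :
    (ts.foldl (fun d term => if term ∈ tok then d.modify term [] f else d) d).getD t []
      = if t ∈ ts ∧ t ∈ tok then f (d.getD t []) else d.getD t [] := by
  induction ts generalizing d with
  | nil => simp
  | cons a ts ih =>
      obtain ⟨ha, hts'⟩ := List.nodup_cons.1 hts
      simp only [List.foldl_cons, ih hts']
      by_cases h2 : t = a
      · subst h2
        by_cases h3 : t ∈ tok <;> simp [h3, ha]
      · by_cases h3 : a ∈ tok <;> simp [h3, h2, PySem.Dict.getD_modify, List.mem_cons]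

theorem pv_outer_getD (ts : List String) (hts : ts.Nodup)
    (l : List (Int × List String)) (d : PySem.Dict String (List Int)) (t : String) :
    (l.foldl (fun d p =>
        ts.foldl (fun d term =>
          if term ∈ p.2 then d.modify term [] (fun row => PySem.List.pySetD row (p.1 - 1) 1) else d) d) d).getD t []
      = l.foldl (fun row p => if t ∈ ts ∧ t ∈ p.2 then PySem.List.pySetD row (p.1 - 1) 1 else row)
          (d.getD t []) := by
  induction l generalizing d with
  | nil => rfl
  | cons p l ih =>
      simp only [List.foldl_cons, ih, pv_inner_getD ts hts p.2]

-- Python list assignment row[j] = v for j in [-len, len): non-negative or wrapped-from-the-end index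
theorem pv_get_set_window (row : List Int) (j i : Int) (v : Int)
    (hj1 : -(row.length : Int) ≤ j) (hj2 : j < (row.length : Int))
    (h0 : 0 ≤ i) (hi : i < (row.length : Int)) :
    PySem.List.pyGetD (PySem.List.pySetD row j v) i 0
      = if j = i ∨ j = i - (row.length : Int) then v else PySem.List.pyGetD row i 0 := by
  have hset : PySem.List.pySetD row j v
      = row.set (if 0 ≤ j then j.toNat else row.length - (-j).toNat) v := by
    by_cases hj : 0 ≤ j
    · rw [PySem.List.pySetD_of_nonneg _ _ hj, if_pos hj]
    · simp only [PySem.List.pySetD, PySem.List.pySet?, PySem.List.pyIdx?, if_neg hj, if_pos hj1,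
        Option.map_some, Option.getD_some, if_neg hj]
  rw [hset, PySem.List.pyGetD_eq_getElem _ _ h0 (by simpa using hi),
      PySem.List.pyGetD_eq_getElem _ _ h0 hi, List.getElem_set]
  by_cases hw : j = i ∨ j = i - (row.length : Int)
  · rw [if_pos (by split <;> omega), if_pos hw]
  · rw [if_neg (by split <;> omega), if_neg hw]

-- the abstract row fold: each step writes a 1 at list index p.1 - 1 (wrapping like Python)
theorem pv_row_getD (c : (Int × List String) → Prop) [DecidablePred c]
    (l : List (Int × List String)) (row : List Int)
    (hb : ∀ p ∈ l, c p → 1 - (row.length : Int) ≤ p.1 ∧ p.1 ≤ (row.length : Int))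
    (i : Int) (h0 : 0 ≤ i) (hi : i < (row.length : Int)) :
    PySem.List.pyGetD (l.foldl (fun row p => if c p then PySem.List.pySetD row (p.1 - 1) 1 else row) row) i 0
      = if ∃ p ∈ l, c p ∧ (p.1 = i + 1 ∨ p.1 = i + 1 - (row.length : Int)) then 1
        else PySem.List.pyGetD row i 0 := by
  induction l generalizing row with
  | nil => simp
  | cons p l ih =>
      have hp := hb p (List.mem_cons_self ..)
      have hlen : (if c p then PySem.List.pySetD row (p.1 - 1) 1 else row).length = row.length := by
        split <;> simp [PySem.List.length_pySetD]
      simp only [List.foldl_cons]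
      rw [ih _ (by rw [hlen]; exact fun q hq => hb q (List.mem_cons_of_mem _ hq)) (by rw [hlen]; exact hi)]
      rw [hlen]
      have hstep : PySem.List.pyGetD (if c p then PySem.List.pySetD row (p.1 - 1) 1 else row) i 0
          = if c p ∧ (p.1 = i + 1 ∨ p.1 = i + 1 - (row.length : Int)) then 1
            else PySem.List.pyGetD row i 0 := by
        by_cases hc : c p
        · simp only [hc, if_true, true_and]
          have hpb := hp hc
          rw [pv_get_set_window row (p.1 - 1) i 1 (by omega) (by omega) h0 hi]
          by_cases hw : p.1 = i + 1 ∨ p.1 = i + 1 - (row.length : Int)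
          · rw [if_pos (by omega), if_pos hw]
          · rw [if_neg (by omega), if_neg hw]
        · rw [if_neg hc, if_neg (by tauto)]
      rw [hstep]
      by_cases h1 : ∃ q ∈ l, c q ∧ (q.1 = i + 1 ∨ q.1 = i + 1 - (row.length : Int))
      · obtain ⟨q, hq, hcq⟩ := h1
        rw [if_pos ⟨q, hq, hcq⟩, if_pos ⟨q, List.mem_cons_of_mem _ hq, hcq⟩]
      · rw [if_neg h1]
        by_cases h2 : c p ∧ (p.1 = i + 1 ∨ p.1 = i + 1 - (row.length : Int))
        · rw [if_pos h2, if_pos ⟨p, List.mem_cons_self .., h2⟩]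
        · rw [if_neg h2, if_neg ?_]
          rintro ⟨q, hq, hcq⟩
          rcases List.mem_cons.1 hq with rfl | hq
          · exact h2 hcq
          · exact h1 ⟨q, hq, hcq⟩

-- writing into the score row never changes its length
theorem pv_len_fold (c : (Int × List String) → Prop) [DecidablePred c]
    (l : List (Int × List String)) (row : List Int) :
    (l.foldl (fun row p => if c p then PySem.List.pySetD row (p.1 - 1) 1 else row) row).length
      = row.length := by
  induction l generalizing row with
  | nil => rfl
  | cons p l ih =>
      simp only [List.foldl_cons]
      rw [ih]
      split <;> simp [PySem.List.length_pySetD]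

-- fold appending one pair per index, with the if outside the append
theorem pv_foldl_append_ite (l : List Int) (P : Int → Prop) [DecidablePred P] (acc : List (Int × Int)) :
    l.foldl (fun scores i => if P i then scores ++ [(i + 1, 1)] else scores ++ [(i + 1, (0 : Int))]) acc
      = acc ++ l.map (fun i => (i + 1, if P i then (1 : Int) else 0)) := by
  have : (fun (scores : List (Int × Int)) i => if P i then scores ++ [(i + 1, 1)] else scores ++ [(i + 1, (0 : Int))])
      = fun scores i => scores ++ [(i + 1, if P i then (1 : Int) else 0)] := by
    funext scores i; split <;> simp
  rw [this, PySem.List.foldl_append_singleton_eq_map]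


-- keys are preserved by the per-document modify loop
theorem pv_keys_inner (ts : List String) (tok : List String) (f : List Int → List Int)
    (d : PySem.Dict String (List Int)) (h : ∀ t ∈ ts, t ∈ d.keys) :
    (ts.foldl (fun d term => if term ∈ tok then d.modify term [] f else d) d).keys = d.keys := by
  induction ts generalizing d with
  | nil => rfl
  | cons a ts ih =>
      have hstep : (if a ∈ tok then d.modify a [] f else d).keys = d.keys := by
        split
        · rw [PySem.Dict.keys_modify]
          exact PySem.Dict.keys_insert_of_contains _ _
            ((PySem.Dict.contains_iff_mem_keys _ _).2 (h a (List.mem_cons_self ..)))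
        · rfl
      simp only [List.foldl_cons]
      rw [ih _ (fun t ht => by rw [hstep]; exact h t (List.mem_cons_of_mem _ ht)), hstep]

theorem pv_keys_outer (ts : List String) (l : List (Int × List String))
    (d : PySem.Dict String (List Int)) (h : ∀ t ∈ ts, t ∈ d.keys) :
    (l.foldl (fun d p =>
        ts.foldl (fun d term =>
          if term ∈ p.2 then d.modify term [] (fun row => PySem.List.pySetD row (p.1 - 1) 1) else d) d) d).keys
      = d.keys := by
  induction l generalizing d with
  | nil => rfl
  | cons p l ih =>
      simp only [List.foldl_cons]
      have hk := pv_keys_inner ts p.2 (fun row => PySem.List.pySetD row (p.1 - 1) 1) d h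
      rw [ih _ (fun t ht => by rw [hk]; exact h t ht), hk]

theorem pv_seed_keys (ts : List String) (hts : ts.Nodup) (v : List Int) :
    (ts.foldl (fun d term => d.insert term v) (PySem.Dict.empty : PySem.Dict String (List Int))).keys = ts := by
  have h := PySem.Dict.items_foldl_insert_fresh ts (fun t => t) (fun _ => v) PySem.Dict.empty
      (fun a _ => by simp) (by simpa using hts)
  simp only [PySem.Dict.keys, h]
  simp [PySem.Dict.empty, Function.comp_def]

theorem pv_sum_ite_nonneg (xs : List String) (C : String → Prop) [DecidablePred C] :
    0 ≤ (xs.map (fun t => if C t then (1 : Int) else 0)).sum := by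
  induction xs with
  | nil => simp
  | cons a xs ih => by_cases h : C a <;> simp [h] <;> omega

theorem pv_sum_ite_pos (xs : List String) (C : String → Prop) [DecidablePred C] :
    (0 < (xs.map (fun t => if C t then (1 : Int) else 0)).sum) ↔ ∃ t ∈ xs, C t := by
  induction xs with
  | nil => simp
  | cons a xs ih =>
      have hnn := pv_sum_ite_nonneg xs C
      by_cases h : C a
      · simp only [List.map_cons, List.sum_cons, if_pos h]
        constructor
        · intro _; exact ⟨a, List.mem_cons_self .., h⟩
        · intro _; omega
      · simp [h, ih]

theorem pv_pyGetD_replicate (n : Nat) (i : Int) (h0 : 0 ≤ i) (hi : i < (n : Int)) :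
    PySem.List.pyGetD (List.replicate n (0 : Int)) i 0 = 0 := by
  rw [PySem.List.pyGetD_eq_getElem _ _ h0 (by simpa using hi)]; simp

-- proof-side name for A's fully built term matrix
def pvMatrix (Q : List String) (documents : List (Int × List String)) : PySem.Dict String (List Int) :=
  documents.foldl (fun d p =>
      Q.foldl (fun d term =>
        if term ∈ p.2 then d.modify term [] (fun row => PySem.List.pySetD row (p.1 - 1) 1) else d) d)
    (Q.foldl (fun d term => d.insert term (List.replicate documents.length 0)) PySem.Dict.empty)

theorem pvMatrix_eq (Q : List String) (documents : List (Int × List String)) :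
    documents.foldl (fun d p =>
        Q.foldl (fun d term =>
          if term ∈ p.2 then d.modify term [] (fun row => PySem.List.pySetD row (p.1 - 1) 1) else d) d)
      (Q.foldl (fun d term => d.insert term (List.replicate documents.length 0)) PySem.Dict.empty)
      = pvMatrix Q documents := rfl

-- per document position k: A's dot-product score equals B's score-row entry
theorem pv_elem (Q : List String) (hQnd : Q.Nodup) (documents : List (Int × List String))
    (hb : ∀ p ∈ documents, (∃ t ∈ Q, t ∈ p.2) →
      1 - (documents.length : Int) ≤ p.1 ∧ p.1 ≤ (documents.length : Int))
    (k : Nat) (hk : k < documents.length) :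
    (if (List.map (fun qd : Int × Int => qd.1 * qd.2)
          ((Q.map (fun term => if PySem.Set.contains Q term then (1 : Int) else 0)).zip
            (Q.map (fun term => PySem.List.pyGetD ((pvMatrix Q documents).getD term []) (k : Int) 0)))).sum > 0
      then (1 : Int) else 0)
    = PySem.List.pyGetD
        (documents.foldl (fun scores p =>
            if Q.any (fun term => p.2.contains term) = true
            then PySem.List.pySetD scores (p.1 - 1) 1 else scores)
          (List.replicate documents.length (0 : Int))) (k : Int) 0 := by
  rw [List.zip_map', List.map_map]
  have hmap : List.map ((fun qd : Int × Int => qd.1 * qd.2) ∘ fun term =>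
        (if PySem.Set.contains Q term then (1 : Int) else 0,
          PySem.List.pyGetD ((pvMatrix Q documents).getD term []) (k : Int) 0)) Q
      = List.map (fun t => if (∃ p ∈ documents, (t ∈ Q ∧ t ∈ p.2) ∧
            (p.1 = (k : Int) + 1 ∨ p.1 = (k : Int) + 1 - (documents.length : Int)))
          then (1 : Int) else 0) Q := by
    apply List.map_congr_left
    intro t ht
    have h1 : PySem.Set.contains Q t = true := by simpa [PySem.Set.contains] using ht
    simp only [Function.comp, h1, if_true, one_mul]
    unfold pvMatrix
    rw [pv_outer_getD Q hQnd, pv_getD_seed, if_pos ht]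
    rw [pv_row_getD (fun p => t ∈ Q ∧ t ∈ p.2) documents _
        (by intro p hp hc; simpa using hb p hp ⟨t, hc.1, hc.2⟩) (k : Int) (by omega) (by simp; omega)]
    rw [pv_pyGetD_replicate documents.length (k : Int) (by omega) (by exact_mod_cast hk)]
    simp only [List.length_replicate]
  rw [hmap]
  rw [pv_row_getD (fun p => Q.any (fun term => p.2.contains term) = true) documents _
      (by intro p hp hc
          obtain ⟨t, ht, htp⟩ := List.any_eq_true.1 hc
          simpa using hb p hp ⟨t, ht, by simpa using htp⟩) (k : Int) (by omega) (by simp; omega)]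
  rw [pv_pyGetD_replicate documents.length (k : Int) (by omega) (by exact_mod_cast hk)]
  simp only [List.length_replicate]
  have hiff : (∃ t ∈ Q, ∃ p ∈ documents, (t ∈ Q ∧ t ∈ p.2) ∧
        (p.1 = (k : Int) + 1 ∨ p.1 = (k : Int) + 1 - (documents.length : Int)))
      ↔ ∃ p ∈ documents, (Q.any (fun term => p.2.contains term) = true) ∧
        (p.1 = (k : Int) + 1 ∨ p.1 = (k : Int) + 1 - (documents.length : Int)) := by
    constructor
    · rintro ⟨t, ht, p, hp, ⟨-, htp⟩, hw⟩
      exact ⟨p, hp, by simp only [List.any_eq_true]; exact ⟨t, ht, by simpa using htp⟩, hw⟩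
    · rintro ⟨p, hp, hc, hw⟩
      obtain ⟨t, ht, htp⟩ := List.any_eq_true.1 hc
      exact ⟨t, ht, p, hp, ⟨ht, by simpa using htp⟩, hw⟩
  simp only [gt_iff_lt]
  rw [if_congr ((pv_sum_ite_pos Q _).trans hiff) rfl rfl]

-- ===== VERDICT (by name: the statement is the Claim_ definition above) =====
set_option maxHeartbeats 1000000 in
theorem binary_independence_model_spec : Claim_equal_binary_independence_model := by
  intro query documents _ hpre
  unfold Spec_binary_independence_model binary_independence_model binary_independence_model_alt
  simp only []
  rw [pv_foldl_append_ite, List.nil_append, PySem.List.pyRange_zero_nat, List.map_map]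
  have hQnd : (PySem.Set.ofList (pvPreprocess query) : List String).Nodup := PySem.Set.nodup_ofList _
  have hseed := pv_seed_keys (PySem.Set.ofList (pvPreprocess query)) hQnd
      (List.replicate documents.length 0)
  have hkeys := pv_keys_outer (PySem.Set.ofList (pvPreprocess query)) documents _
      (fun t ht => by rw [hseed]; exact ht)
  rw [hkeys, hseed, pvMatrix_eq]
  apply List.ext_getElem
  · simp [PySem.List.length_enumerate, pv_len_fold]
  · intro k hk1 hk2
    have hk : k < documents.length := by simpa using hk1
    simp only [List.getElem_map, List.getElem_range, Function.comp]
    rw [PySem.List.getElem_enumerate]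
    rw [show (1 : Int) + (k : Int) = (k : Int) + 1 by omega]
    apply congrArg (Prod.mk ((k : Int) + 1))
    have h := pv_elem _ hQnd documents
      (fun p hp h => hpre p hp (by
        obtain ⟨t, ht, htp⟩ := h
        exact ⟨t, (PySem.Set.mem_ofList _ _).1 ht, htp⟩)) k hk
    rw [PySem.List.pyGetD_eq_getElem _ _ (by omega)
        (by rw [pv_len_fold]; simpa using hk)] at h
    simpa using h
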